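-- pv_equiv track=rewrite | github.com/yinkaisheng/Python-UIAutomation-for-Windows | demos/rename_pdf_bookmark.py | Rename2
-- ===== SOURCE A (Python) =====
-- LowerWords = ['a', 'an', 'and', 'at', 'for', 'in', 'of', 'on', 'the', 'to', 'with', 'from']
--
-- MatchWords = ['chapter', 'ch', 'section', 'hour', 'lession', 'tutorial']#, 'step'
--
-- Punctuation = '!"\',:;?)'  # '!"\',.:;?)'
--
-- PunctuationPostfix = '!,:;?)'
--
-- UpperWords = {
--     'amd': 'AMD',
--     'api': 'API',
--     'apis': 'APIs',
--     'arp': 'ARP',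
--     'dhcp': 'DHCP',
--     'dns': 'DNS',
--     'e-mail': 'E-mail',
--     'e-mails': 'E-mails',
--     'ee': 'EE',
--     'eula' : 'EULA',
--     'http': 'HTTP',
--     'ip': 'IP',
--     'mac': 'MAC',
--     'unix': 'UNIX',
--     'pc': 'PC',
--     'pcs': 'PCs',
--     'tcp': 'TCP',
--     'tcp/ip': 'TCP/IP',
--     'udp': 'UDP',
--     'uml': 'UML',
--     'i': 'I',
--     'ii': 'II',
--     'iii': 'III',
--     'iv': 'IV',
--     'v': 'V',
--     'vi': 'VI',
--     'vii': 'VII',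
--     'viii': 'VIII',
--     'ix': 'IX',
--     'x': 'X',
--     'xi': 'XI',
--     'xii': 'XII',
--     'xiii': 'XIII',
--     'xiv': 'XIV',
--     'xv': 'XV',
--     }
--
-- def Rename2(name, removeChapter = True):
--     alert = False
--     newName = name.strip().replace('‘', '\'').replace('’', '\'').replace('“', '"').replace('”', '"')
--     if newName.startswith('www.'):
--         return newName, alert
--     newName = newName.title()
--     words = newName.split()
--     if len(words) == 0:
--         return '', alert
--     firstWord = words[0].lower()
--     if removeChapter and firstWord in MatchWords and len(words) > 2:
--         del words[0]
--     skipIndex = 1 if words[0][-1].isdigit() else 0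
--     i = 0
--     while i < len(words):
--         lowerWord = words[i].lower()
--         if lowerWord[0] in PunctuationPostfix:
--             if i > 0 and len(words[i]) == 1:
--                 alert = True
--                 words[i-1] += words[i]
--                 del words[i]
--                 i -= 1
--                 continue
--         start_punctuation = ''
--         end_punctuation = ''
--         if lowerWord[0] in Punctuation:
--             start_punctuation = lowerWord[0]
--             lowerWord = lowerWord[1:]
--         if lowerWord[-1] in Punctuation:
--             end_punctuation = lowerWord[-1]
--             lowerWord = lowerWord[:-1]
--         if lowerWord in UpperWords:
--             words[i] = start_punctuation + UpperWords[lowerWord] + end_punctuation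
--             i += 1
--             continue
--         if i > skipIndex and lowerWord in LowerWords:
--             if words[i-1][-1] != ':':
--                 words[i] = lowerWord
--         i += 1
--     newName = ' '.join(words)
--     return newName, alert
-- ===== SOURCE B (Python) =====
-- LowerWords = ['a', 'an', 'and', 'at', 'for', 'in', 'of', 'on', 'the', 'to', 'with', 'from']
--
-- MatchWords = ['chapter', 'ch', 'section', 'hour', 'lession', 'tutorial']
--
-- Punctuation = '!"\',:;?)'
--
-- PunctuationPostfix = '!,:;?)'
--
-- UpperWords = {
--     'amd': 'AMD', 'api': 'API', 'apis': 'APIs', 'arp': 'ARP', 'dhcp': 'DHCP',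
--     'dns': 'DNS', 'e-mail': 'E-mail', 'e-mails': 'E-mails', 'ee': 'EE',
--     'eula': 'EULA', 'http': 'HTTP', 'ip': 'IP', 'mac': 'MAC', 'unix': 'UNIX',
--     'pc': 'PC', 'pcs': 'PCs', 'tcp': 'TCP', 'tcp/ip': 'TCP/IP', 'udp': 'UDP',
--     'uml': 'UML', 'i': 'I', 'ii': 'II', 'iii': 'III', 'iv': 'IV', 'v': 'V',
--     'vi': 'VI', 'vii': 'VII', 'viii': 'VIII', 'ix': 'IX', 'x': 'X', 'xi': 'XI',
--     'xii': 'XII', 'xiii': 'XIII', 'xiv': 'XIV', 'xv': 'XV',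
--     }
--
-- def _fix(word, acc, skipIndex):
--     lw = word.lower()
--     sp = ep = ''
--     if lw[0] in Punctuation:
--         sp, lw = lw[0], lw[1:]
--     if lw[-1] in Punctuation:
--         ep, lw = lw[-1], lw[:-1]
--     if lw in UpperWords:
--         return sp + UpperWords[lw] + ep
--     if len(acc) > skipIndex and lw in LowerWords and acc[-1][-1] != ':':
--         return lw
--     return word
--
-- def Rename2(name, removeChapter = True):
--     alert = False
--     newName = name.strip().replace('\u2018', '\'').replace('\u2019', '\'').replace('\u201c', '"').replace('\u201d', '"')
--     if newName.startswith('www.'):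
--         return newName, alert
--     words = newName.title().split()
--     if not words:
--         return '', alert
--     if removeChapter and words[0].lower() in MatchWords and len(words) > 2:
--         words = words[1:]
--     skipIndex = 1 if words[0][-1].isdigit() else 0
--     acc = []
--     for w in words:
--         if acc and len(w) == 1 and w in PunctuationPostfix:
--             alert = True
--             acc.append(_fix(acc.pop() + w, acc, skipIndex))
--         else:
--             acc.append(_fix(w, acc, skipIndex))
--     return ' '.join(acc), alert
-- ===== Notes on version B (the rewrite author's own statement) =====
-- stated objective: simpler
-- what changed: A's single in-place while-loop with index rewinding (del words[i]; i -= 1; continue) is replaced by one left-to-right fold that builds an output list, merging a lone postfix-punctuation word into the accumulator's last element and re-applying one shared _fix helper to it, with no index arithmetic or list mutation.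
-- outside the precondition, e.g. on Rename2('"', True): A raises IndexError, B raises IndexError
import Mathlib
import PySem

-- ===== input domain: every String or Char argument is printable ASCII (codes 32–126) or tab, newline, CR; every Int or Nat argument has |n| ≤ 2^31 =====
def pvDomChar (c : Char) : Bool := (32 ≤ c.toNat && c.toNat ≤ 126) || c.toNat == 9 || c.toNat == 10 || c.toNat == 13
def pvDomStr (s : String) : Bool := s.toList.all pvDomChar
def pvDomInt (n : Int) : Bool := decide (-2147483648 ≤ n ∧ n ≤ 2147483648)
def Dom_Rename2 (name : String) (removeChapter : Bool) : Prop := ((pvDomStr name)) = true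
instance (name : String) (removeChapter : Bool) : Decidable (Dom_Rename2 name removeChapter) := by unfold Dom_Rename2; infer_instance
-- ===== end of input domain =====

-- B replaces A's in-place while-loop with index rewinding and `del` by a single left-to-right
-- fold over the word list with an output accumulator and one shared fix-up helper (objective:
-- simpler decomposition, same cost). Equivalence is proved on Pre_ (inputs where A's Python
-- does not raise); the ports are faithful on that set.

set_option maxRecDepth 2048

-- ===== PORT A =====
-- module constants shared by both Python sources
def LowerW : List (List Char) :=
  ["a".toList, "an".toList, "and".toList, "at".toList, "for".toList, "in".toList,
   "of".toList, "on".toList, "the".toList, "to".toList, "with".toList, "from".toList]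
def MatchW : List (List Char) :=
  ["chapter".toList, "ch".toList, "section".toList, "hour".toList, "lession".toList, "tutorial".toList]
def PunctChars : List Char := ['!', '"', '\'', ',', ':', ';', '?', ')']
def PunctPostfix : List Char := ['!', ',', ':', ';', '?', ')']
def UpperW : PySem.Dict (List Char) (List Char) := PySem.Dict.ofList
  [("amd".toList, "AMD".toList), ("api".toList, "API".toList), ("apis".toList, "APIs".toList),
   ("arp".toList, "ARP".toList), ("dhcp".toList, "DHCP".toList), ("dns".toList, "DNS".toList),
   ("e-mail".toList, "E-mail".toList), ("e-mails".toList, "E-mails".toList), ("ee".toList, "EE".toList),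
   ("eula".toList, "EULA".toList), ("http".toList, "HTTP".toList), ("ip".toList, "IP".toList),
   ("mac".toList, "MAC".toList), ("unix".toList, "UNIX".toList), ("pc".toList, "PC".toList),
   ("pcs".toList, "PCs".toList), ("tcp".toList, "TCP".toList), ("tcp/ip".toList, "TCP/IP".toList),
   ("udp".toList, "UDP".toList), ("uml".toList, "UML".toList), ("i".toList, "I".toList),
   ("ii".toList, "II".toList), ("iii".toList, "III".toList), ("iv".toList, "IV".toList),
   ("v".toList, "V".toList), ("vi".toList, "VI".toList), ("vii".toList, "VII".toList),
   ("viii".toList, "VIII".toList), ("ix".toList, "IX".toList), ("x".toList, "X".toList),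
   ("xi".toList, "XI".toList), ("xii".toList, "XII".toList), ("xiii".toList, "XIII".toList),
   ("xiv".toList, "XIV".toList), ("xv".toList, "XV".toList)]

-- str.title(), hand-ported (PySem has no title); exact on the ASCII domain, where the
-- cased characters are exactly the letters.  `prevAlpha` = "previous char is cased".
def pyTitle : List Char → Bool → List Char
  | [], _ => []
  | c :: cs, prevAlpha =>
    (if PySem.Chars.isalpha c then
       (if prevAlpha then PySem.Chars.lowerChar c else PySem.Chars.upperChar c)
     else c) :: pyTitle cs (PySem.Chars.isalpha c)

-- A's while-loop.  `w[-1]` / `w[0]` on a possibly-empty word are written with a default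
-- (`getLastD ' '` / `headD ' '`): Python raises IndexError exactly where the default is read
-- on an empty word, and Pre_Rename2 excludes those inputs.  Single-character-string
-- membership `lw[0] in Punctuation` is `List.contains` on the char.
def loopA (skip : Nat) (words : List (List Char)) (i : Nat) (alert : Bool) :
    List (List Char) × Bool :=
  if _h : i < words.length then
    let word := PySem.List.pyGetD words (i : Int) []   -- words[i], in range here (i < len)
    let lw := PySem.Chars.lower word
    if PunctPostfix.contains (lw.headD ' ') && decide (0 < i) && (word.length == 1) then
      loopA skip ((words.set (i - 1) (PySem.List.pyGetD words ((i : Int) - 1) [] ++ word)).eraseIdx i)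
        (i - 1) true
    else
      let p := lw.headD ' '
      let sp : List Char := if PunctChars.contains p then [p] else []
      let lw1 := if PunctChars.contains p then lw.tail else lw
      let e := lw1.getLastD ' '
      let ep : List Char := if PunctChars.contains e then [e] else []
      let lw2 := if PunctChars.contains e then lw1.dropLast else lw1
      match UpperW.get? lw2 with
      | some u => loopA skip (words.set i (sp ++ u ++ ep)) (i + 1) alert
      | none =>
        if decide (skip < i) && LowerW.contains lw2 then
          if (PySem.List.pyGetD words ((i : Int) - 1) []).getLastD ' ' != ':' then
            loopA skip (words.set i lw2) (i + 1) alert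
          else loopA skip words (i + 1) alert
        else loopA skip words (i + 1) alert
  else (words, alert)
termination_by 2 * words.length - i
decreasing_by
  all_goals try simp only [List.length_eraseIdx, List.length_set]
  all_goals first
    | omega
    | (split <;> omega)

def Rename2 (name : String) (removeChapter : Bool) : String × Bool :=
  let alert := false
  let s0 := PySem.Chars.strip name.toList
  let s1 := PySem.Chars.replace (PySem.Chars.replace (PySem.Chars.replace
              (PySem.Chars.replace s0 ['‘'] ['\'']) ['’'] ['\'']) ['“'] ['"']) ['”'] ['"']
  if PySem.Chars.startswith s1 "www.".toList then (String.ofList s1, alert) else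
  let t := pyTitle s1 false
  let words0 := PySem.Chars.split₀ t
  if words0.length = 0 then ("", alert) else
  let firstWord := PySem.Chars.lower (PySem.List.pyGetD words0 0 [])
  let words1 :=
    if removeChapter && MatchW.contains firstWord && decide (2 < words0.length) then
      words0.eraseIdx 0
    else words0
  let skip : Nat :=
    if PySem.Chars.isdigit ((PySem.List.pyGetD words1 0 []).getLastD ' ') then 1 else 0
  let r := loopA skip words1 0 alert
  (String.ofList (PySem.Chars.join [' '] r.1), r.2)

-- ===== PORT B =====
-- _fix from Source B (same defaulting convention as loopA at the Python IndexError points)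
def fixB (skip : Nat) (acc : List (List Char)) (word : List Char) : List Char :=
  let lw := PySem.Chars.lower word
  let p := lw.headD ' '
  let sp : List Char := if PunctChars.contains p then [p] else []
  let lw1 := if PunctChars.contains p then lw.tail else lw
  let e := lw1.getLastD ' '
  let ep : List Char := if PunctChars.contains e then [e] else []
  let lw2 := if PunctChars.contains e then lw1.dropLast else lw1
  match UpperW.get? lw2 with
  | some u => sp ++ u ++ ep
  | none =>
    if decide (skip < acc.length) && LowerW.contains lw2 &&
        ((acc.getLastD []).getLastD ' ' != ':') then lw2
    else word

-- the fold of Source B: `acc.pop() + w` merged and re-fixed, or `w` fixed and appended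
def loopB (skip : Nat) : List (List Char) → List (List Char) → Bool → List (List Char) × Bool
  | [], acc, alert => (acc, alert)
  | w :: rest, acc, alert =>
    if !acc.isEmpty && (w.length == 1) && PunctPostfix.contains (w.headD ' ') then
      loopB skip rest (acc.dropLast ++ [fixB skip acc.dropLast (acc.getLastD [] ++ w)]) true
    else
      loopB skip rest (acc ++ [fixB skip acc w]) alert

def Rename2_alt (name : String) (removeChapter : Bool) : String × Bool :=
  let alert := false
  let s0 := PySem.Chars.strip name.toList
  let s1 := PySem.Chars.replace (PySem.Chars.replace (PySem.Chars.replace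
              (PySem.Chars.replace s0 ['‘'] ['\'']) ['’'] ['\'']) ['“'] ['"']) ['”'] ['"']
  if PySem.Chars.startswith s1 "www.".toList then (String.ofList s1, alert) else
  let t := pyTitle s1 false
  let words0 := PySem.Chars.split₀ t
  if words0 = [] then ("", alert) else
  let firstWord := PySem.Chars.lower (PySem.List.pyGetD words0 0 [])
  let words1 :=
    if removeChapter && MatchW.contains firstWord && decide (2 < words0.length) then
      PySem.List.slice words0 (some 1) none
    else words0
  let skip : Nat :=
    if PySem.Chars.isdigit ((PySem.List.pyGetD words1 0 []).getLastD ' ') then 1 else 0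
  let r := loopB skip words1 [] alert
  (String.ofList (PySem.Chars.join [' '] r.1), r.2)

-- ===== PRECONDITION & SPEC =====
def pvSinglePunct (w : List Char) : Bool := (w.length == 1) && PunctChars.contains (w.headD ' ')

-- Pre_ excludes exactly the inputs on which A's Python raises IndexError: after the
-- strip / split / chapter-removal preamble, a word list whose first word is a lone
-- punctuation character, or containing a lone '"' or '\'' anywhere (str.title() preserves
-- word shapes and punctuation, so the condition is stated on the raw stripped words).
def Pre_Rename2 (name : String) (removeChapter : Bool) : Prop :=
  let s := PySem.Chars.strip name.toList
  PySem.Chars.startswith s "www.".toList = true ∨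
  (let ws0 := PySem.Chars.split₀ s
   let ws := if removeChapter && MatchW.contains (PySem.Chars.lower (PySem.List.pyGetD ws0 0 []))
                && decide (2 < ws0.length) then ws0.tail else ws0
   ws = [] ∨ (pvSinglePunct (ws.headD []) = false ∧ ∀ w ∈ ws, ¬(w = ['"'] ∨ w = ['\''])))
instance (name : String) (removeChapter : Bool) : Decidable (Pre_Rename2 name removeChapter) := by
  unfold Pre_Rename2; infer_instance

def pvWitness_Rename2 : String × Bool := ("chapter 3: the tcp/ip api, e-mail!", true)

def Spec_Rename2 (name : String) (removeChapter : Bool) (out : String × Bool) : Prop := out = Rename2_alt name removeChapter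
instance (name : String) (removeChapter : Bool) (out : String × Bool) : Decidable (Spec_Rename2 name removeChapter out) := by unfold Spec_Rename2; infer_instance

-- ===== CLAIM (what is proved, stated in full; the proofs are below) =====
def Claim_equal_Rename2 : Prop := ∀ (name : String) (removeChapter : Bool), Dom_Rename2 name removeChapter → Pre_Rename2 name removeChapter → Spec_Rename2 name removeChapter (Rename2 name removeChapter)

-- ===== LEMMAS AND PROOFS =====

theorem pv_char_eq_iff (c d : Char) : c = d ↔ c.toNat = d.toNat := eq_iff_eq_of_cmp_eq_cmp rfl

theorem pv_mem_pp_iff (d : Char) : PunctPostfix.contains d = true ↔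
    (d.toNat = 33 ∨ d.toNat = 44 ∨ d.toNat = 58 ∨ d.toNat = 59 ∨ d.toNat = 63 ∨ d.toNat = 41) := by
  simp [PunctPostfix, pv_char_eq_iff]

theorem pv_lowerChar_pp (c : Char) :
    PunctPostfix.contains (PySem.Chars.lowerChar c) = PunctPostfix.contains c := by
  unfold PySem.Chars.lowerChar
  by_cases hc : PySem.Chars.isupper c = true
  · have hup : ('A' ≤ c ∧ c ≤ 'Z') := by simpa [PySem.Chars.isupper] using hc
    have h1 : 65 ≤ c.toNat := Fin.mk_le_mk.mp hup.1
    have h2 : c.toNat ≤ 90 := Fin.mk_le_mk.mp hup.2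
    have hval : (Char.ofNat (c.toNat + 32)).toNat = c.toNat + 32 := by
      rw [Char.toNat_ofNat, if_pos (Or.inl (by omega))]
    rw [if_pos hc, Bool.eq_iff_iff, pv_mem_pp_iff, pv_mem_pp_iff, hval]
    omega
  · rw [if_neg hc]

theorem pv_headD_lower (w : List Char) :
    (PySem.Chars.lower w).headD ' ' = PySem.Chars.lowerChar (w.headD ' ') := by
  cases w with
  | nil => decide
  | cons c cs => simp [PySem.Chars.lower]

-- A's merge test and B's merge test compute the same Bool
theorem pv_condAB (acc : List (List Char)) (w : List Char) :
    (PunctPostfix.contains ((PySem.Chars.lower w).headD ' ') && decide (0 < acc.length)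
        && (w.length == 1))
      = (!acc.isEmpty && (w.length == 1) && PunctPostfix.contains (w.headD ' ')) := by
  rw [pv_headD_lower, pv_lowerChar_pp]
  cases acc <;> cases PunctPostfix.contains (w.headD ' ') <;> cases w.length == 1 <;> simp

theorem pv_set_append {α : Type} (acc rest : List α) (w v : α) :
    (acc ++ w :: rest).set acc.length v = acc ++ v :: rest := by
  rw [List.set_append]; simp

theorem pv_erase_append {α : Type} (acc rest : List α) (w : α) :
    (acc ++ w :: rest).eraseIdx acc.length = acc ++ rest := by
  induction acc with
  | nil => simp
  | cons a as ih => simpa using ih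

theorem pv_prev_getD (acc rest : List (List Char)) (h : acc ≠ []) :
    PySem.List.pyGetD (acc ++ rest) ((acc.length : Int) - 1) [] = acc.getLastD [] := by
  have hcast : ((acc.length : Int) - 1) = ((acc.length - 1 : Nat) : Int) := by
    cases acc with
    | nil => simp_all
    | cons a as => simp
  rw [hcast, PySem.List.pyGetD_natCast]
  rw [List.getD_eq_getElem?_getD, List.getElem?_append_left (by cases acc <;> simp_all)]
  rw [List.getLastD_eq_getLast?, List.getLast?_eq_getElem?]

theorem pv_go_ne (s : List Char) : ∀ (cur : List Char) (acc : List (List Char)),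
    (∀ w ∈ acc, w ≠ []) → ∀ w ∈ PySem.Chars.split₀.go s cur acc, w ≠ [] := by
  induction s with
  | nil =>
    intro cur acc hacc w hw
    unfold PySem.Chars.split₀.go at hw
    split at hw
    · exact hacc w (by simpa using hw)
    · rcases (by simpa using hw : w ∈ acc ∨ w = cur.reverse) with h | h
      · exact hacc w h
      · subst h; simp_all [List.isEmpty_iff]
  | cons c rest ih =>
    intro cur acc hacc w hw
    unfold PySem.Chars.split₀.go at hw
    split at hw
    · split at hw
      · exact ih [] acc hacc w hw
      · refine ih [] (cur.reverse :: acc) ?_ w hw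
        intro v hv
        rcases List.mem_cons.mp hv with h | h
        · subst h; simp_all [List.isEmpty_iff]
        · exact hacc v h
    · exact ih (c :: cur) acc hacc w hw

theorem pv_split_ne (s : List Char) : ∀ w ∈ PySem.Chars.split₀ s, w ≠ [] := by
  intro w hw
  exact pv_go_ne s [] [] (by simp) w hw

theorem pv_dict_get_mem (l : List (List Char × List Char)) :
    ∀ (k v : List Char), (PySem.Dict.mk l).get? k = some v → v ∈ l.map Prod.snd := by
  induction l with
  | nil => intro k v h; simp [PySem.Dict.get?] at h
  | cons p rest ih =>
    intro k v h
    rw [PySem.Dict.get?_mk_cons] at h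
    split at h
    · simp_all
    · exact List.mem_cons_of_mem _ (ih k v h)

theorem pv_upperW_ne (k u : List Char) (h : UpperW.get? k = some u) : u ≠ [] := by
  have hU : UpperW = PySem.Dict.mk
    [("amd".toList, "AMD".toList), ("api".toList, "API".toList), ("apis".toList, "APIs".toList),
     ("arp".toList, "ARP".toList), ("dhcp".toList, "DHCP".toList), ("dns".toList, "DNS".toList),
     ("e-mail".toList, "E-mail".toList), ("e-mails".toList, "E-mails".toList), ("ee".toList, "EE".toList),
     ("eula".toList, "EULA".toList), ("http".toList, "HTTP".toList), ("ip".toList, "IP".toList),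
     ("mac".toList, "MAC".toList), ("unix".toList, "UNIX".toList), ("pc".toList, "PC".toList),
     ("pcs".toList, "PCs".toList), ("tcp".toList, "TCP".toList), ("tcp/ip".toList, "TCP/IP".toList),
     ("udp".toList, "UDP".toList), ("uml".toList, "UML".toList), ("i".toList, "I".toList),
     ("ii".toList, "II".toList), ("iii".toList, "III".toList), ("iv".toList, "IV".toList),
     ("v".toList, "V".toList), ("vi".toList, "VI".toList), ("vii".toList, "VII".toList),
     ("viii".toList, "VIII".toList), ("ix".toList, "IX".toList), ("x".toList, "X".toList),
     ("xi".toList, "XI".toList), ("xii".toList, "XII".toList), ("xiii".toList, "XIII".toList),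
     ("xiv".toList, "XIV".toList), ("xv".toList, "XV".toList)] := by decide
  rw [hU] at h
  have hv := pv_dict_get_mem _ k u h
  have hne : ∀ v ∈ ([("amd".toList, "AMD".toList), ("api".toList, "API".toList), ("apis".toList, "APIs".toList),
     ("arp".toList, "ARP".toList), ("dhcp".toList, "DHCP".toList), ("dns".toList, "DNS".toList),
     ("e-mail".toList, "E-mail".toList), ("e-mails".toList, "E-mails".toList), ("ee".toList, "EE".toList),
     ("eula".toList, "EULA".toList), ("http".toList, "HTTP".toList), ("ip".toList, "IP".toList),
     ("mac".toList, "MAC".toList), ("unix".toList, "UNIX".toList), ("pc".toList, "PC".toList),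
     ("pcs".toList, "PCs".toList), ("tcp".toList, "TCP".toList), ("tcp/ip".toList, "TCP/IP".toList),
     ("udp".toList, "UDP".toList), ("uml".toList, "UML".toList), ("i".toList, "I".toList),
     ("ii".toList, "II".toList), ("iii".toList, "III".toList), ("iv".toList, "IV".toList),
     ("v".toList, "V".toList), ("vi".toList, "VI".toList), ("vii".toList, "VII".toList),
     ("viii".toList, "VIII".toList), ("ix".toList, "IX".toList), ("x".toList, "X".toList),
     ("xi".toList, "XI".toList), ("xii".toList, "XII".toList), ("xiii".toList, "XIII".toList),
     ("xiv".toList, "XIV".toList), ("xv".toList, "XV".toList)].map Prod.snd), v ≠ [] := by decide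
  exact hne u hv

theorem pv_lowerW_ne (w : List Char) (h : LowerW.contains w = true) : w ≠ [] := by
  have : w ∈ LowerW := by simpa using h
  have hne : ∀ v ∈ LowerW, v ≠ [] := by decide
  exact hne w this

theorem pv_fixB_ne (skip : Nat) (acc : List (List Char)) (word : List Char) (h : word ≠ []) :
    fixB skip acc word ≠ [] := by
  unfold fixB
  dsimp only
  repeat' split
  all_goals try exact h
  all_goals try (rename_i hc; exact pv_lowerW_ne _ ((Bool.and_eq_true_iff.mp (Bool.and_eq_true_iff.mp hc).1).2))
  all_goals simp [List.append_eq_nil_iff]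
  all_goals exact pv_upperW_ne _ _ (by assumption)

theorem pv_mid_getD {α : Type} (acc rest : List α) (w : α) (d : α) :
    PySem.List.pyGetD (acc ++ w :: rest) (acc.length : Int) d = w := by
  rw [PySem.List.pyGetD_natCast, List.getD_eq_getElem?_getD,
    List.getElem?_append_right (le_refl _)]
  simp

theorem pv_stepFix (skip : Nat) (acc rest : List (List Char)) (w : List Char) (alert : Bool)
    (hcond : (PunctPostfix.contains ((PySem.Chars.lower w).headD ' ') && decide (0 < acc.length)
        && (w.length == 1)) = false) :
    loopA skip (acc ++ w :: rest) acc.length alert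
      = loopA skip (acc ++ fixB skip acc w :: rest) (acc.length + 1) alert := by
  rw [loopA]
  rw [dif_pos (by simp)]
  dsimp only
  rw [pv_mid_getD]
  rw [if_neg (by simp only [hcond]; simp)]
  unfold fixB
  dsimp only
  split
  · rw [pv_set_append]
  · rcases eq_or_ne acc [] with rfl | hacc
    · simp
    · rw [pv_prev_getD _ _ hacc]
      repeat' split
      all_goals (try rfl)
      all_goals (try (rw [pv_set_append]))
      all_goals simp_all

theorem pv_loop_eq (skip : Nat) (n : Nat) :
    ∀ (rest acc : List (List Char)) (alert : Bool),
      acc.length + 2 * rest.length ≤ n →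
      (∀ w ∈ acc, w ≠ []) → (∀ w ∈ rest, w ≠ []) →
      loopA skip (acc ++ rest) acc.length alert = loopB skip rest acc alert := by
  induction n using Nat.strong_induction_on with
  | _ n ih =>
  intro rest acc alert hle ha hr
  cases rest with
  | nil =>
    rw [loopA, dif_neg (by simp)]
    simp [loopB]
  | cons w rest' =>
    have hw : w ≠ [] := hr w (by simp)
    have hn : 0 < n := by simp at hle; omega
    by_cases hc : (PunctPostfix.contains ((PySem.Chars.lower w).headD ' ')
        && decide (0 < acc.length) && (w.length == 1)) = true
    · -- merge step: A rewrites the previous word in place and rewinds; B pops and re-fixes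
      have hacc : acc ≠ [] := by
        intro h
        subst h
        simp at hc
      obtain ⟨acc', pl, rfl⟩ : ∃ acc' pl, acc = acc' ++ [pl] := by
        rcases List.eq_nil_or_concat acc with h | ⟨a', x, h⟩
        · exact absurd h hacc
        · exact ⟨a', x, by simpa using h⟩
      have hpl : pl ≠ [] := ha pl (by simp)
      rw [loopA, dif_pos (by simp), ]
      dsimp only
      rw [pv_mid_getD, if_pos hc, pv_prev_getD _ _ (by simp)]
      have hset : ((acc' ++ [pl]) ++ w :: rest').set ((acc' ++ [pl]).length - 1)
          ((acc' ++ [pl]).getLastD [] ++ w) = acc' ++ (pl ++ w) :: w :: rest' := by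
        rw [List.getLastD_concat]
        have : (acc' ++ [pl]) ++ w :: rest' = acc' ++ pl :: w :: rest' := by simp
        rw [this]
        have hidx : (acc' ++ [pl]).length - 1 = acc'.length := by simp
        rw [hidx, pv_set_append]
      rw [hset]
      have herase : (acc' ++ (pl ++ w) :: w :: rest').eraseIdx ((acc' ++ [pl]).length)
          = acc' ++ (pl ++ w) :: rest' := by
        have : acc' ++ (pl ++ w) :: w :: rest' = (acc' ++ [pl ++ w]) ++ w :: rest' := by simp
        rw [this]
        have hidx : (acc' ++ [pl]).length = (acc' ++ [pl ++ w]).length := by simp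
        rw [hidx, pv_erase_append]
        simp
      rw [herase]
      have hidx2 : (acc' ++ [pl]).length - 1 = acc'.length := by simp
      rw [hidx2]
      have hlen2 : ((pl ++ w).length == 1) = false := by
        have h1 : 1 ≤ pl.length := by cases pl <;> simp_all
        have h2 : 1 ≤ w.length := by cases w <;> simp_all
        simp only [List.length_append, beq_eq_false_iff_ne, ne_eq]
        omega
      rw [pv_stepFix skip acc' rest' (pl ++ w) true
        (by rw [hlen2]; simp)]
      have harr : acc' ++ fixB skip acc' (pl ++ w) :: rest'
          = (acc' ++ [fixB skip acc' (pl ++ w)]) ++ rest' := by simp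
      have hlen3 : acc'.length + 1 = (acc' ++ [fixB skip acc' (pl ++ w)]).length := by simp
      rw [harr, hlen3]
      rw [ih (n - 1) (by omega) rest' (acc' ++ [fixB skip acc' (pl ++ w)]) true
        (by simp at hle ⊢; omega)
        (by
          intro v hv
          rcases List.mem_append.mp hv with h | h
          · exact ha v (by simp [h])
          · have : v = fixB skip acc' (pl ++ w) := by simpa using h
            subst this
            exact pv_fixB_ne _ _ _ (by simp [hpl]))
        (fun v hv => hr v (by simp [hv]))]
      conv_rhs => rw [loopB]
      rw [if_pos (by rw [← pv_condAB]; exact hc)]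
      rw [List.dropLast_concat, List.getLastD_concat]
    · -- plain fix step
      rw [pv_stepFix skip acc rest' w alert (by simpa using hc)]
      have harr : acc ++ fixB skip acc w :: rest' = (acc ++ [fixB skip acc w]) ++ rest' := by simp
      have hlen3 : acc.length + 1 = (acc ++ [fixB skip acc w]).length := by simp
      rw [harr, hlen3]
      rw [ih (n - 1) (by omega) rest' (acc ++ [fixB skip acc w]) alert
        (by simp at hle ⊢; omega)
        (by
          intro v hv
          rcases List.mem_append.mp hv with h | h
          · exact ha v h
          · have : v = fixB skip acc w := by simpa using h
            subst this
            exact pv_fixB_ne _ _ _ hw)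
        (fun v hv => hr v (by simp [hv]))]
      conv_rhs => rw [loopB]
      rw [if_neg (by rw [← pv_condAB]; simpa using hc)]

theorem pv_slice1 {α : Type} (xs : List α) :
    PySem.List.slice xs (some 1) none = xs.eraseIdx 0 := by
  rw [PySem.List.slice_from xs (by norm_num)]
  simp [List.eraseIdx_zero, List.drop_one]

-- ===== VERDICT (by name: the statement is the Claim_ definition above) =====
theorem Rename2_spec : Claim_equal_Rename2 := by
  intro name removeChapter hdom hpre
  unfold Spec_Rename2 Rename2 Rename2_alt
  dsimp only
  split
  · rfl
  · next h =>
    have hne := pv_split_ne (pyTitle (PySem.Chars.replace (PySem.Chars.replace (PySem.Chars.replace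
      (PySem.Chars.replace (PySem.Chars.strip name.toList) ['‘'] ['\'']) ['’'] ['\'']) ['“'] ['"']) ['”'] ['"']) false)
    generalize hws : PySem.Chars.split₀ (pyTitle (PySem.Chars.replace (PySem.Chars.replace (PySem.Chars.replace
      (PySem.Chars.replace (PySem.Chars.strip name.toList) ['‘'] ['\'']) ['’'] ['\'']) ['“'] ['"']) ['”'] ['"']) false) = ws0 at hne ⊢
    split
    · next h2 => rw [if_pos (List.length_eq_zero_iff.mp h2)]
    · next h2 =>
      rw [if_neg (show ¬(ws0 = []) from fun hh => h2 (by simp [hh]))]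
      rw [pv_slice1]
      have hinv : ∀ v ∈ (if removeChapter && MatchW.contains (PySem.Chars.lower (PySem.List.pyGetD ws0 0 []))
          && decide (2 < ws0.length) then ws0.eraseIdx 0 else ws0), v ≠ [] := by
        split
        · exact fun v hv => hne v (List.eraseIdx_subset hv)
        · exact hne
      generalize hW : (if removeChapter && MatchW.contains (PySem.Chars.lower (PySem.List.pyGetD ws0 0 []))
          && decide (2 < ws0.length) then ws0.eraseIdx 0 else ws0) = W at hinv ⊢
      generalize hS : (if PySem.Chars.isdigit ((PySem.List.pyGetD W 0 []).getLastD ' ') = true then 1 else 0 : Nat) = S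
      have hmain := pv_loop_eq S (0 + 2 * W.length) W [] false (by simp) (by simp) hinv
      simp only [List.nil_append, List.length_nil] at hmain
      rw [hmain]
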